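-- pv_equiv track=rewrite | github.com/BinWu-859/aoc | 2024/04.py | count
-- ===== SOURCE A (Python) =====
-- def count(map, stack):
--     ret = 0
--     while stack:
--         i, j, delta, c = stack.pop()
--
--         if 0 <= i <= len(map) - 1 and 0 <= j <= len(map[0]) - 1:
--             if c != map[i][j]:
--                 continue
--             if c == 8:
--                 ret += 1
--                 continue
--             stack.append((i + delta[0], j + delta[1], delta, c*2))
--     return ret
-- ===== SOURCE B (Python) =====
-- def count(map, stack):
--     # Same return value as A; like A, empties the caller's stack (observable mutation preserved).
--     def walk(i, j, delta, c):
--         while 0 <= i <= len(map) - 1 and 0 <= j <= len(map[0]) - 1 and c == map[i][j]: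
--             if c == 8:
--                 return 1
--             i += delta[0]
--             j += delta[1]
--             c *= 2
--         return 0
--     ret = 0
--     while stack:
--         ret += walk(*stack.pop())
--     return ret
-- ===== Notes on version B (the rewrite author's own statement) =====
-- stated objective: simpler
-- what changed: Instead of feeding each chain's successor state back through the shared work stack, B pops each initial entry once and walks its whole straight-line chain in a local helper loop, summing per-entry results.
-- outside the precondition, e.g. on count([[1, 2], [3]], [(0, 0, (0, 1), 9)]): A returns 0, B returns 0
import Mathlib
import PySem

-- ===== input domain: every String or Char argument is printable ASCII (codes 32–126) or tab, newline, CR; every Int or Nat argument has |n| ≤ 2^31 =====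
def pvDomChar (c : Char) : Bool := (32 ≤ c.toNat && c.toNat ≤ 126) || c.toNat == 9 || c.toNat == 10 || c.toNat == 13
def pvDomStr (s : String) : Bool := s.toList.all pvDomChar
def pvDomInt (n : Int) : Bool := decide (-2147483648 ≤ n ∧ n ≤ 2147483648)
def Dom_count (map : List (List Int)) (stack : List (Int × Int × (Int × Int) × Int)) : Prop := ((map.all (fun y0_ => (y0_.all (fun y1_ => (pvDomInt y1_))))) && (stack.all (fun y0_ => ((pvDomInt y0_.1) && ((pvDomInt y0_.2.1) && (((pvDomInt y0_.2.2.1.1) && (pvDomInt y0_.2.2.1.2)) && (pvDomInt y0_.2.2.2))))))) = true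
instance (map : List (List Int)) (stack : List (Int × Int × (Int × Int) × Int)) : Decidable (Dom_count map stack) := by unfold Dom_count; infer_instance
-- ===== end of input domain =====

-- B replaces A's self-pushing shared-stack traversal by a per-entry chain walk summed over the popped entries; objective: simpler.
-- Equivalence is about the return value; both Pythons empty the caller's `stack` (same observable mutation).


-- shared small helpers: the bounds test "0 <= i <= len(map)-1 and 0 <= j <= len(map[0])-1" and the cell map[i][j]
-- (with default 0 / []; exact wherever the Python actually reads, which Pre_count guarantees is in range)
abbrev pvInB (map : List (List Int)) (i j : Int) : Prop :=
  0 ≤ i ∧ i ≤ (map.length : Int) - 1 ∧ 0 ≤ j ∧ j ≤ ((map.headD []).length : Int) - 1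
def pvCell (map : List (List Int)) (i j : Int) : Int :=
  PySem.List.pyGetD (PySem.List.pyGetD map i []) j 0
-- fuel generous enough for one chain (a chain makes ≤ len(map)+len(map[0])+2 pops, proved below)
def pvEntryFuel (map : List (List Int)) : Nat := map.length + (map.headD []).length + 2

-- ===== PORT A =====
-- the while-loop; the Lean list is A's Python stack reversed (head = top), so pop = head, push = cons; fuel bounds the pops
def pvLoopA (map : List (List Int)) : Nat → List (Int × Int × (Int × Int) × Int) → Int → Int
  | 0, _, ret => ret
  | _ + 1, [], ret => ret
  | f + 1, (i, j, d, c) :: rest, ret =>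
    if pvInB map i j then
      if c ≠ pvCell map i j then pvLoopA map f rest ret
      else if c = 8 then pvLoopA map f rest (ret + 1)
      else pvLoopA map f ((i + d.1, j + d.2, d, c * 2) :: rest) ret
    else pvLoopA map f rest ret

def count (map : List (List Int)) (stack : List (Int × Int × (Int × Int) × Int)) : Int :=
  pvLoopA map (stack.length * pvEntryFuel map) stack.reverse 0

-- ===== PORT B =====
-- Source B's inner helper `walk`: follows one chain directly
def pvWalk (map : List (List Int)) (d : Int × Int) : Nat → Int → Int → Int → Int
  | 0, _, _, _ => 0
  | f + 1, i, j, c =>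
    if pvInB map i j ∧ c = pvCell map i j then
      if c = 8 then 1 else pvWalk map d f (i + d.1) (j + d.2) (c * 2)
    else 0

def count_alt (map : List (List Int)) (stack : List (Int × Int × (Int × Int) × Int)) : Int :=
  stack.reverse.foldl
    (fun ret e => ret + pvWalk map e.2.2.1 (pvEntryFuel map) e.1 e.2.1 e.2.2.2) 0

-- ===== PRECONDITION & SPEC =====
-- Pre_count excludes (a) ragged maps with some row shorter than row 0, on which a chain can step onto a short row
-- and A raises IndexError (on ragged maps where no chain happens to reach a short row A returns normally and B agrees,
-- but that safe set is not closed-form), and (b) stack entries with delta=(0,0), c=0 pointing at an in-bounds cell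
-- holding 0, on which A loops forever.
def Pre_count (map : List (List Int)) (stack : List (Int × Int × (Int × Int) × Int)) : Prop :=
  (∀ row ∈ map, (map.headD []).length ≤ row.length) ∧
  (∀ e ∈ stack, ¬ (e.2.2.1 = (0, 0) ∧ e.2.2.2 = 0 ∧ pvInB map e.1 e.2.1 ∧ pvCell map e.1 e.2.1 = 0))
instance (map : List (List Int)) (stack : List (Int × Int × (Int × Int) × Int)) : Decidable (Pre_count map stack) := by unfold Pre_count; infer_instance
def pvWitness_count : List (List Int) × (List (Int × Int × (Int × Int) × Int)) :=
  ([[1, 8], [2, 0]], [(0, 0, (0, 1), 1)])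
def Spec_count (map : List (List Int)) (stack : List (Int × Int × (Int × Int) × Int)) (out : Int) : Prop := out = count_alt map stack
instance (map : List (List Int)) (stack : List (Int × Int × (Int × Int) × Int)) (out : Int) : Decidable (Spec_count map stack out) := by unfold Spec_count; infer_instance

-- ===== CLAIM (what is proved, stated in full; the proofs are below) =====
def Claim_equal_count : Prop := ∀ (map : List (List Int)) (stack : List (Int × Int × (Int × Int) × Int)), Dom_count map stack → Pre_count map stack → Spec_count map stack (count map stack)

-- ===== LEMMAS AND PROOFS =====

-- pvStops map d k i j c: the chain from (i,j,c) along d halts at exactly the k-th pop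
def pvStops (map : List (List Int)) (d : Int × Int) : Nat → Int → Int → Int → Prop
  | 0, _, _, _ => False
  | 1, i, j, c => ¬ (pvInB map i j ∧ c = pvCell map i j) ∨ c = 8
  | k + 2, i, j, c => (pvInB map i j ∧ c = pvCell map i j) ∧ c ≠ 8 ∧
      pvStops map d (k + 1) (i + d.1) (j + d.2) (c * 2)

theorem pvLoopA_nil (map : List (List Int)) (f : Nat) (ret : Int) :
    pvLoopA map f [] ret = ret := by cases f <;> rfl

theorem pvChain (map : List (List Int)) (d : Int × Int) :
    ∀ k i j c, pvStops map d k i j c →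
    ∀ f rest ret, pvLoopA map (k + f) ((i, j, d, c) :: rest) ret
      = pvLoopA map f rest (ret + pvWalk map d k i j c) := by
  intro k
  induction k using Nat.strong_induction_on with
  | _ k IH =>
    match k with
    | 0 => intro i j c h; exact absurd h (by simp [pvStops])
    | 1 =>
      intro i j c h f rest ret
      have h1 : 1 + f = f + 1 := by omega
      rw [h1]
      by_cases hc : pvInB map i j ∧ c = pvCell map i j
      · rcases h with h | h8
        · exact absurd hc h
        · simp only [pvLoopA, pvWalk, if_pos hc.1, if_neg (not_not_intro hc.2), if_pos h8,
            if_pos hc]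
      · simp only [pvWalk, if_neg hc, add_zero]
        by_cases hb : pvInB map i j
        · have hne : c ≠ pvCell map i j := fun he => hc ⟨hb, he⟩
          simp only [pvLoopA, if_pos hb, if_pos hne]
        · simp only [pvLoopA, if_neg hb]
    | (k + 2) =>
      intro i j c h f rest ret
      obtain ⟨hc, h8, hrest⟩ := h
      have h1 : k + 2 + f = (k + 1 + f) + 1 := by omega
      rw [h1]
      have hstep : pvLoopA map (k + 1 + f + 1) ((i, j, d, c) :: rest) ret
          = pvLoopA map (k + 1 + f) ((i + d.1, j + d.2, d, c * 2) :: rest) ret := by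
        simp only [pvLoopA, if_pos hc.1, if_neg (not_not_intro hc.2), if_neg h8]
      rw [hstep, IH (k + 1) (by omega) _ _ _ hrest f rest ret]
      have hw : pvWalk map d (k + 2) i j c = pvWalk map d (k + 1) (i + d.1) (j + d.2) (c * 2) := by
        simp only [pvWalk, if_pos hc, if_neg h8]
      rw [hw]

theorem pvWalk_stable (map : List (List Int)) (d : Int × Int) :
    ∀ k i j c, pvStops map d k i j c →
    ∀ g, k ≤ g → pvWalk map d g i j c = pvWalk map d k i j c := by
  intro k
  induction k using Nat.strong_induction_on with
  | _ k IH =>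
    match k with
    | 0 => intro i j c h; exact absurd h (by simp [pvStops])
    | 1 =>
      intro i j c h g hg
      obtain ⟨g', rfl⟩ : ∃ g', g = g' + 1 := ⟨g - 1, by omega⟩
      by_cases hc : pvInB map i j ∧ c = pvCell map i j
      · rcases h with h | h8
        · exact absurd hc h
        · simp only [pvWalk, if_pos hc, if_pos h8]
      · simp only [pvWalk, if_neg hc]
    | (k + 2) =>
      intro i j c h g hg
      obtain ⟨hc, h8, hrest⟩ := h
      obtain ⟨g', rfl⟩ : ∃ g', g = g' + 1 := ⟨g - 1, by omega⟩
      simp only [pvWalk, if_pos hc, if_neg h8]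
      exact IH (k + 1) (by omega) _ _ _ hrest g' (by omega)

-- existence of a halting index, via a strictly decreasing integer measure
theorem pvEx_meas (map : List (List Int)) (d : Int × Int) (μ : Int → Int → Int)
    (hdec : ∀ i j c, (pvInB map i j ∧ c = pvCell map i j) →
      1 ≤ μ i j ∧ μ (i + d.1) (j + d.2) ≤ μ i j - 1) :
    ∀ n : Nat, ∀ i j c, μ i j ≤ (n : Int) → ∃ k, k ≤ n + 1 ∧ pvStops map d k i j c := by
  intro n
  induction n with
  | zero =>
    intro i j c hμ
    by_cases hc : pvInB map i j ∧ c = pvCell map i j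
    · exact absurd hμ (by have := (hdec i j c hc).1; omega)
    · exact ⟨1, le_refl _, Or.inl hc⟩
  | succ m IH =>
    intro i j c hμ
    by_cases hc : pvInB map i j ∧ c = pvCell map i j
    · by_cases h8 : c = 8
      · exact ⟨1, by omega, Or.inr h8⟩
      · have hd := hdec i j c hc
        obtain ⟨k, hk, hst⟩ := IH (i + d.1) (j + d.2) (c * 2) (by push_cast at hμ ⊢; omega)
        obtain ⟨k', rfl⟩ : ∃ k', k = k' + 1 := by
          cases k with
          | zero => exact absurd hst (by simp [pvStops])
          | succ k' => exact ⟨k', rfl⟩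
        exact ⟨k' + 2, by omega, ⟨hc, h8, hst⟩⟩
    · exact ⟨1, by omega, Or.inl hc⟩

theorem pvEx (map : List (List Int)) (d : Int × Int) (i j c : Int)
    (hok : ¬ (d = (0, 0) ∧ c = 0 ∧ pvInB map i j ∧ pvCell map i j = 0)) :
    ∃ k, k ≤ pvEntryFuel map ∧ pvStops map d k i j c := by
  by_cases hc : pvInB map i j ∧ c = pvCell map i j
  case neg => exact ⟨1, by simp only [pvEntryFuel]; omega, Or.inl hc⟩
  case pos =>
  obtain ⟨⟨hi0, hi1, hj0, hj1⟩, hcell⟩ := hc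
  rcases lt_trichotomy d.1 0 with hd1 | hd1 | hd1
  · -- d.1 ≤ -1 : measure i + 1
    obtain ⟨k, hk, hst⟩ := pvEx_meas map d (fun i _ => i + 1)
      (by intro i j c h; obtain ⟨⟨h1, h2, h3, h4⟩, _⟩ := h; dsimp only; omega)
      (i.toNat + 1) i j c (by dsimp only; omega)
    exact ⟨k, by simp only [pvEntryFuel]; omega, hst⟩
  · rcases lt_trichotomy d.2 0 with hd2 | hd2 | hd2
    · -- d.2 ≤ -1 : measure j + 1
      obtain ⟨k, hk, hst⟩ := pvEx_meas map d (fun _ j => j + 1)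
        (by intro i j c h; obtain ⟨⟨h1, h2, h3, h4⟩, _⟩ := h; dsimp only; omega)
        (j.toNat + 1) i j c (by dsimp only; omega)
      exact ⟨k, by simp only [pvEntryFuel]; omega, hst⟩
    · -- d = (0,0): c ≠ 0 (Pre), so the doubled c mismatches the fixed cell after one step
      have hd : d = (0, 0) := by
        obtain ⟨a, b⟩ := d; simp only [Prod.mk.injEq]; simp only at hd1 hd2; omega
      have hc0 : c ≠ 0 := fun h0 =>
        hok ⟨hd, h0, ⟨hi0, hi1, hj0, hj1⟩, by rw [← hcell, h0]⟩
      by_cases h8 : c = 8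
      · exact ⟨1, by simp only [pvEntryFuel]; omega, Or.inr h8⟩
      · refine ⟨2, by simp only [pvEntryFuel]; omega, ⟨⟨⟨hi0, hi1, hj0, hj1⟩, hcell⟩, h8, Or.inl ?_⟩⟩
        intro ⟨_, hcc⟩
        rw [hd] at hcc
        simp only [add_zero] at hcc
        rw [← hcell] at hcc
        omega
    · -- 1 ≤ d.2 (and d.1 = 0) : measure W - j
      obtain ⟨k, hk, hst⟩ := pvEx_meas map d (fun _ j => ((map.headD []).length : Int) - j)
        (by intro i j c h; obtain ⟨⟨h1, h2, h3, h4⟩, _⟩ := h; dsimp only; omega)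
        ((map.headD []).length) i j c (by dsimp only; omega)
      exact ⟨k, by simp only [pvEntryFuel]; omega, hst⟩
  · -- 1 ≤ d.1 : measure H - i
    obtain ⟨k, hk, hst⟩ := pvEx_meas map d (fun i _ => (map.length : Int) - i)
      (by intro i j c h; obtain ⟨⟨h1, h2, h3, h4⟩, _⟩ := h; dsimp only; omega)
      (map.length) i j c (by dsimp only; omega)
    exact ⟨k, by simp only [pvEntryFuel]; omega, hst⟩

theorem pvMain (map : List (List Int)) :
    ∀ (st : List (Int × Int × (Int × Int) × Int)),
    (∀ e ∈ st, ¬ (e.2.2.1 = (0, 0) ∧ e.2.2.2 = 0 ∧ pvInB map e.1 e.2.1 ∧ pvCell map e.1 e.2.1 = 0)) →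
    ∀ f, st.length * pvEntryFuel map ≤ f → ∀ ret,
    pvLoopA map f st ret
      = st.foldl (fun ret e => ret + pvWalk map e.2.2.1 (pvEntryFuel map) e.1 e.2.1 e.2.2.2) ret := by
  intro st
  induction st with
  | nil => intro _ f _ ret; simp [pvLoopA_nil]
  | cons e rest IH =>
    intro hok f hf ret
    obtain ⟨i, j, d, c⟩ := e
    obtain ⟨k, hk, hst⟩ := pvEx map d i j c (hok _ (List.mem_cons_self ..))
    simp only [List.length_cons] at hf
    have hsm : (rest.length + 1) * pvEntryFuel map
        = rest.length * pvEntryFuel map + pvEntryFuel map := by ring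
    have hF2 : 2 ≤ pvEntryFuel map := by simp only [pvEntryFuel]; omega
    have hkf : k ≤ f := by omega
    have hsplit : f = k + (f - k) := by omega
    have hok' : ∀ e ∈ rest, ¬ (e.2.2.1 = (0, 0) ∧ e.2.2.2 = 0 ∧
        pvInB map e.1 e.2.1 ∧ pvCell map e.1 e.2.1 = 0) :=
      fun e he => hok e (List.mem_cons_of_mem _ he)
    have hb : rest.length * pvEntryFuel map ≤ f - k := by omega
    rw [hsplit, pvChain map d k i j c hst (f - k) rest ret,
        ← pvWalk_stable map d k i j c hst (pvEntryFuel map) hk,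
        IH hok' (f - k) hb]
    simp

-- ===== VERDICT (by name: the statement is the Claim_ definition above) =====
theorem count_spec : Claim_equal_count := by
  intro map stack _ hpre
  unfold Spec_count count count_alt
  rw [← List.length_reverse (as := stack)]
  exact pvMain map stack.reverse
    (fun e he => hpre.2 e (List.mem_reverse.mp he))
    _ (le_refl _) 0
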